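-- pv_equiv track=rewrite | github.com/ninepig/leecode_dd_2024 | zdd/ddlastRound/ddHighChance/chefOrderScaleProift.py | getMaxPorif2
-- ===== SOURCE A (Python) =====
-- def getMaxPorif2(chefs:list[int],orderScale:list[int],orderProfit:list[int])->int:
--     if not chefs or not orderScale or not orderProfit :
--         return 0
--     if len(chefs)==0 or len(orderScale)== 0 or len(orderProfit) == 0 or len(orderProfit) != len(orderScale):
--         return 0
--     scale_profit = sorted(zip(orderScale,orderProfit),key=lambda x:x[0]) ## get orderScale, Profit tuple, sorted with scale aseding
--     res = 0
--     for chef in sorted(chefs):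
--         idx = 0
--         best = 0
--         ## 这里必须是 》= 因为difficult 可能duplicated，同等情况下 可能profit会高 ,如果profit 不和难度正比的话 我们就要这么做
--         while idx < len(scale_profit) and chef >= scale_profit[idx][0]: ## find most profit under his scale
--             best = max(best,scale_profit[idx][1])
--             idx += 1
--         res += best
--
--     return res
-- ===== SOURCE B (Python) =====
-- def getMaxPorif2(chefs: list[int], orderScale: list[int], orderProfit: list[int]) -> int:
--     if not chefs or not orderScale or not orderProfit or len(orderScale) != len(orderProfit):
--         return 0
--     pairs = sorted(zip(orderScale, orderProfit), key=lambda x: x[0])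
--     scales = [s for s, _ in pairs]
--     # prefix maxima clamped at 0: pm[k] = max(0, max of first k profits)
--     pm = [0]
--     for _, p in pairs:
--         pm.append(max(pm[-1], p))
--     res = 0
--     for c in chefs:
--         # binary search: number of scales <= c
--         lo, hi = 0, len(scales)
--         while lo < hi:
--             mid = (lo + hi) // 2
--             if scales[mid] <= c:
--                 lo = mid + 1
--             else:
--                 hi = mid
--         res += pm[lo]
--     return res
-- ===== Notes on version B (the rewrite author's own statement) =====
-- stated objective: faster
-- what changed: Replaces the per-chef linear scan over the sorted (scale, profit) pairs by a precomputed clamped prefix-maximum array plus a binary search per chef for the number of scales within reach.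
import Mathlib
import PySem

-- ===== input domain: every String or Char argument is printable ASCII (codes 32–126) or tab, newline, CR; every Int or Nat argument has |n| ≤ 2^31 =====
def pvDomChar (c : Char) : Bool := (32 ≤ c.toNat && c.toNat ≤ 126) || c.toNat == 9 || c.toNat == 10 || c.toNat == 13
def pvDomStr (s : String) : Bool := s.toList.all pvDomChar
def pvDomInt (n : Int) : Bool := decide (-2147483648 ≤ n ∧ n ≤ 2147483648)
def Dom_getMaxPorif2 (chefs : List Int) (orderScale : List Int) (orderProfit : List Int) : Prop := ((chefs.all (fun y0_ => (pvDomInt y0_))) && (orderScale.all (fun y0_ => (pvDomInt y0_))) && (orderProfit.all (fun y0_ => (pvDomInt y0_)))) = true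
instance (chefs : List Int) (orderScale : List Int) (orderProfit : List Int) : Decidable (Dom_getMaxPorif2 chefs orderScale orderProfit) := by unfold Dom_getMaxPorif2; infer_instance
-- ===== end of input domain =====

-- B replaces A's per-chef linear scan with a clamped prefix-maximum array and a binary search per chef (faster).

-- ===== PORT A =====
-- the while loop: scan forward while chef >= scale, keeping the running best profit
def pvAWhile (chef : Int) (sp : List (Int × Int)) (best : Int) : Int :=
  match sp with
  | [] => best
  | x :: rest => if chef ≥ x.1 then pvAWhile chef rest (max best x.2) else best

def getMaxPorif2 (chefs : List Int) (orderScale : List Int) (orderProfit : List Int) : Int :=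
  if chefs = [] ∨ orderScale = [] ∨ orderProfit = [] then 0
  else if chefs.length = 0 ∨ orderScale.length = 0 ∨ orderProfit.length = 0 ∨ orderProfit.length ≠ orderScale.length then 0
  else
    let scale_profit := PySem.List.sorted (List.zip orderScale orderProfit) (fun x => x.1) false
    (PySem.List.sorted chefs (fun x => x) false).foldl
      (fun res chef => res + pvAWhile chef scale_profit 0) 0

-- ===== PORT B =====
-- the pm-building loop: pm = [0]; for _, p in pairs: pm.append(max(pm[-1], p))  (tail after the initial 0)
def pvBuildPM (pairs : List (Int × Int)) (cur : Int) : List Int :=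
  match pairs with
  | [] => []
  | x :: rest => (max cur x.2) :: pvBuildPM rest (max cur x.2)

-- the binary-search while loop of Source B
def pvBSearch (scales : List Int) (c : Int) (lo hi : Nat) : Nat :=
  if h : lo < hi then
    let mid := (lo + hi) / 2
    if scales.getD mid 0 ≤ c then pvBSearch scales c (mid + 1) hi
    else pvBSearch scales c lo mid
  else lo
termination_by hi - lo
decreasing_by all_goals omega

def getMaxPorif2_alt (chefs : List Int) (orderScale : List Int) (orderProfit : List Int) : Int :=
  if chefs = [] ∨ orderScale = [] ∨ orderProfit = [] ∨ orderScale.length ≠ orderProfit.length then 0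
  else
    let pairs := PySem.List.sorted (List.zip orderScale orderProfit) (fun x => x.1) false
    let scales := pairs.map (fun x => x.1)
    let pm := 0 :: pvBuildPM pairs 0
    chefs.foldl (fun res c => res + pm.getD (pvBSearch scales c 0 scales.length) 0) 0

-- ===== PRECONDITION & SPEC =====
def Spec_getMaxPorif2 (chefs : List Int) (orderScale : List Int) (orderProfit : List Int) (out : Int) : Prop := out = getMaxPorif2_alt chefs orderScale orderProfit
instance (chefs : List Int) (orderScale : List Int) (orderProfit : List Int) (out : Int) : Decidable (Spec_getMaxPorif2 chefs orderScale orderProfit out) := by unfold Spec_getMaxPorif2; infer_instance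

-- ===== CLAIM (what is proved, stated in full; the proofs are below) =====
def Claim_equal_getMaxPorif2 : Prop := ∀ (chefs : List Int) (orderScale : List Int) (orderProfit : List Int), Dom_getMaxPorif2 chefs orderScale orderProfit → Spec_getMaxPorif2 chefs orderScale orderProfit (getMaxPorif2 chefs orderScale orderProfit)

-- ===== LEMMAS AND PROOFS =====

-- A's while loop is the fold of max over the takeWhile prefix
theorem pvAWhile_eq_takeWhile (c : Int) (sp : List (Int × Int)) (best : Int) :
    pvAWhile c sp best
      = (sp.takeWhile (fun x => decide (x.1 ≤ c))).foldl (fun b x => max b x.2) best := by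
  induction sp generalizing best with
  | nil => rfl
  | cons x rest ih =>
    by_cases h : x.1 ≤ c
    · simp [pvAWhile, h, ge_iff_le, ih]
    · simp [pvAWhile, h, ge_iff_le]

-- pm[j] is the fold of max over the first j profits
theorem pvBuildPM_getD (pairs : List (Int × Int)) (cur : Int) (j : Nat) (hj : j ≤ pairs.length) :
    (cur :: pvBuildPM pairs cur).getD j 0
      = (pairs.take j).foldl (fun b x => max b x.2) cur := by
  induction pairs generalizing cur j with
  | nil =>
    have : j = 0 := Nat.le_zero.mp (by simpa using hj)
    subst this; rfl
  | cons x rest ih =>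
    cases j with
    | zero => rfl
    | succ j =>
      have hj' : j ≤ rest.length := by simpa using hj
      simpa [pvBuildPM, List.take_succ_cons] using ih (max cur x.2) j hj'

-- on a sorted list, an element is ≤ c exactly when its index lies in the takeWhile prefix
theorem sorted_getD_le_iff (c : Int) (scales : List Int)
    (hp : scales.Pairwise (fun a b => a ≤ b)) (i : Nat) (hi : i < scales.length) :
    (scales.getD i 0 ≤ c) ↔ i < (scales.takeWhile (fun s => decide (s ≤ c))).length := by
  induction scales generalizing i with
  | nil => simp at hi
  | cons s rest ih =>
    have hrest : rest.Pairwise (fun a b => a ≤ b) := (List.pairwise_cons.mp hp).2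
    have hall : ∀ x ∈ rest, s ≤ x := (List.pairwise_cons.mp hp).1
    cases i with
    | zero =>
      by_cases h : s ≤ c <;> simp [List.takeWhile_cons, h]
    | succ i =>
      have hi' : i < rest.length := by simpa using hi
      by_cases h : s ≤ c
      · simpa [List.takeWhile_cons, h, Nat.succ_lt_succ_iff] using ih hrest i hi'
      · simp only [List.takeWhile_cons, h, decide_false]
        constructor
        · intro hle
          exfalso
          have hmem : rest.getD i 0 ∈ rest := by
            rw [List.getD_eq_getElem _ _ hi']
            exact List.getElem_mem hi'
          exact h (le_trans (hall _ hmem) hle)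
        · intro hlt
          simp at hlt

-- binary search computes the takeWhile length, given a bracketing invariant (fuel induction)
theorem pvBSearch_eq (scales : List Int) (c : Int)
    (hp : scales.Pairwise (fun a b => a ≤ b)) :
    ∀ (n lo hi : Nat), hi - lo ≤ n → hi ≤ scales.length →
      lo ≤ (scales.takeWhile (fun s => decide (s ≤ c))).length →
      (scales.takeWhile (fun s => decide (s ≤ c))).length ≤ hi →
      pvBSearch scales c lo hi = (scales.takeWhile (fun s => decide (s ≤ c))).length := by
  intro n
  induction n with
  | zero =>
    intro lo hi hfuel hhi hlo hk
    rw [pvBSearch]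
    rw [dif_neg (by omega)]
    omega
  | succ n ih =>
    intro lo hi hfuel hhi hlo hk
    rw [pvBSearch]
    by_cases h : lo < hi
    · rw [dif_pos h]
      show (if scales.getD ((lo + hi) / 2) 0 ≤ c
              then pvBSearch scales c ((lo + hi) / 2 + 1) hi
              else pvBSearch scales c lo ((lo + hi) / 2))
            = (scales.takeWhile (fun s => decide (s ≤ c))).length
      have hmid : (lo + hi) / 2 < scales.length := by omega
      by_cases hle : scales.getD ((lo + hi) / 2) 0 ≤ c
      · rw [if_pos hle]
        have hk' := (sorted_getD_le_iff c scales hp _ hmid).mp hle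
        exact ih _ _ (by omega) hhi (by omega) hk
      · rw [if_neg hle]
        have hk' : ¬ (lo + hi) / 2 < (scales.takeWhile (fun s => decide (s ≤ c))).length :=
          fun hc => hle ((sorted_getD_le_iff c scales hp _ hmid).mpr hc)
        exact ih _ _ (by omega) (by omega) hlo (by omega)
    · rw [dif_neg h]
      omega

-- per-chef agreement: A's scan value equals B's pm lookup after the binary search
theorem perChef_eq (c : Int) (pairs : List (Int × Int))
    (hp : pairs.Pairwise (fun a b => a.1 ≤ b.1)) :
    pvAWhile c pairs 0
      = (0 :: pvBuildPM pairs 0).getD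
          (pvBSearch (pairs.map (fun x => x.1)) c 0 (pairs.map (fun x => x.1)).length) 0 := by
  have hscales : (pairs.map (fun x => x.1)).Pairwise (fun a b => a ≤ b) := by
    rw [List.pairwise_map]; exact hp
  have htwmap : ((pairs.map (fun x => x.1)).takeWhile (fun s => decide (s ≤ c))).length
      = (pairs.takeWhile (fun x => decide (x.1 ≤ c))).length := by
    rw [List.takeWhile_map, List.length_map]
    rfl
  have hklen : (pairs.takeWhile (fun x => decide (x.1 ≤ c))).length ≤ pairs.length :=
    List.IsPrefix.length_le (List.takeWhile_prefix _)
  have hbs : pvBSearch (pairs.map (fun x => x.1)) c 0 (pairs.map (fun x => x.1)).length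
      = (pairs.takeWhile (fun x => decide (x.1 ≤ c))).length := by
    rw [pvBSearch_eq (pairs.map (fun x => x.1)) c hscales
        ((pairs.map (fun x => x.1)).length) 0 (pairs.map (fun x => x.1)).length
        (by omega) (le_refl _) (by omega) (by rw [htwmap]; simpa using hklen), htwmap]
  rw [hbs, pvBuildPM_getD pairs 0 _ hklen, pvAWhile_eq_takeWhile]
  have htake : List.take (List.takeWhile (fun x => decide (x.1 ≤ c)) pairs).length pairs
      = List.takeWhile (fun x => decide (x.1 ≤ c)) pairs :=
    (List.prefix_iff_eq_take.mp (List.takeWhile_prefix _)).symm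
  rw [htake]

-- folding "+ f x" over lists: congruence on members and invariance under permutation
theorem foldl_add_ext (f g : Int → Int) (l : List Int) (h : ∀ x ∈ l, f x = g x) :
    l.foldl (fun r x => r + f x) 0 = l.foldl (fun r x => r + g x) 0 := by
  rw [PySem.List.foldl_add, PySem.List.foldl_add]
  exact congrArg _ (congrArg _ (List.map_congr_left h))

theorem foldl_add_perm (f : Int → Int) (l₁ l₂ : List Int) (hperm : l₁.Perm l₂) :
    l₁.foldl (fun r x => r + f x) 0 = l₂.foldl (fun r x => r + f x) 0 := by
  rw [PySem.List.foldl_add, PySem.List.foldl_add]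
  exact congrArg _ ((hperm.map f).sum_eq)

-- ===== VERDICT (by name: the statement is the Claim_ definition above) =====
theorem getMaxPorif2_spec : Claim_equal_getMaxPorif2 := by
  intro chefs orderScale orderProfit _
  unfold Spec_getMaxPorif2 getMaxPorif2 getMaxPorif2_alt
  by_cases h1 : chefs = []
  · simp [h1]
  by_cases h2 : orderScale = []
  · simp [h2]
  by_cases h3 : orderProfit = []
  · simp [h3]
  by_cases h4 : orderScale.length = orderProfit.length
  · rw [if_neg (by tauto), if_neg (by
        intro hcon
        rcases hcon with h | h | h | h
        · exact h1 (List.length_eq_zero_iff.mp h)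
        · exact h2 (List.length_eq_zero_iff.mp h)
        · exact h3 (List.length_eq_zero_iff.mp h)
        · exact h h4.symm),
      if_neg (by
        intro hcon
        rcases hcon with h | h | h | h
        · exact h1 h
        · exact h2 h
        · exact h3 h
        · exact h h4)]
    have hp : (PySem.List.sorted (List.zip orderScale orderProfit) (fun x => x.1) false).Pairwise
        (fun a b => a.1 ≤ b.1) := PySem.List.sorted_pairwise _ _
    rw [foldl_add_perm
      (fun c => pvAWhile c (PySem.List.sorted (List.zip orderScale orderProfit) (fun x => x.1) false) 0)
      (PySem.List.sorted chefs (fun x => x) false) chefs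
      (PySem.List.sorted_perm chefs (fun x => x) false)]
    exact foldl_add_ext _ _ chefs (fun c _ => perChef_eq c _ hp)
  · rw [if_neg (by tauto), if_pos (Or.inr (Or.inr (Or.inr (fun he => h4 he.symm)))),
        if_pos (Or.inr (Or.inr (Or.inr h4)))]
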